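-- pv_equiv track=rewrite | github.com/passagemath/passagemath-pkg-moment_cone | src/cone/utils.py | fl_dic
-- ===== SOURCE A (Python) =====
-- def fl_dic(D : dict[int, list["Root"]], L: list[int])-> dict[int, int]:
--     """
--     dictionnary h -> sum lenght D[i] for i <=h, for h in L.
--     L has to be a sorted list.
--     """
--     length_D = {}
--     total = 0
--     for key in sorted(D.keys()) :
--         total += len(D[key])
--         length_D[key] = total
--     result = {}
--     for j in L:
--         # Chercher la plus grande clé i ≤ j (ou 0 si aucune clé ne convient)
--         i_max = max((i for i in sorted(D.keys()) if i <= j), default=None)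
--         result[j] = length_D[i_max] if i_max is not None else 0
--     return(result)
-- ===== SOURCE B (Python) =====
-- def fl_dic(D, L):
--     """Same result as A: sort the keys once, build prefix sums of len(D[k]),
--     then answer each j with a binary search (bisect_right) instead of A's
--     per-query re-sort + max-scan."""
--     keys = sorted(D.keys())
--     prefix = [0]
--     total = 0
--     for k in keys:
--         total += len(D[k])
--         prefix.append(total)
--     result = {}
--     for j in L:
--         # hand-rolled bisect.bisect_right(keys, j) (A imports nothing)
--         lo, hi = 0, len(keys)
--         while lo < hi:
--             mid = (lo + hi) // 2
--             if j < keys[mid]: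
--                 hi = mid
--             else:
--                 lo = mid + 1
--         result[j] = prefix[lo]
--     return result
-- ===== Notes on version B (the rewrite author's own statement) =====
-- stated objective: faster
-- what changed: A re-sorts the keys and scans for the maximal key <= j for every query; B sorts the keys once, builds a prefix-sum array, and answers each query with a binary search.
import Mathlib
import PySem

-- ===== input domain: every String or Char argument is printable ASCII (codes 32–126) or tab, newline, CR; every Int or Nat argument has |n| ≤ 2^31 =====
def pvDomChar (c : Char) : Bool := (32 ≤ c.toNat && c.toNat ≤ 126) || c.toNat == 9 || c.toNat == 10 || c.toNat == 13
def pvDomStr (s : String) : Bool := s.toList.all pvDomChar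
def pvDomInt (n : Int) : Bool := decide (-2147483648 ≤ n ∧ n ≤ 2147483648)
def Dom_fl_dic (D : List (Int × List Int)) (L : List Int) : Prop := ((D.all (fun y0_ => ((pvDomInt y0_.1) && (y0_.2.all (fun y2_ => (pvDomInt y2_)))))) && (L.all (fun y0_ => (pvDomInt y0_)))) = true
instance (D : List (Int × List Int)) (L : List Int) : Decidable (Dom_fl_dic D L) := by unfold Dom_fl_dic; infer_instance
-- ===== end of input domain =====

-- ===== PORT A =====
-- B sorts once + prefix sums + binary search instead of A's per-query re-sort and max-scan.
def fl_dic (D : List (Int × List Int)) (L : List Int) : List (Int × Int) :=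
  let d := PySem.Dict.ofList D
  let st := (PySem.List.sorted (PySem.Dict.keys d) (fun x => x) false).foldl
      (fun (p : PySem.Dict Int Int × Int) key =>
        let total := p.2 + ((PySem.Dict.getD d key []).length : Int)  -- key ∈ d.keys: D[key] never raises, getD is exact
        (PySem.Dict.insert p.1 key total, total))
      (PySem.Dict.empty, 0)
  let length_D := st.1
  let result := L.foldl
      (fun (r : PySem.Dict Int Int) j =>
        match PySem.List.max? ((PySem.List.sorted (PySem.Dict.keys d) (fun x => x) false).filter
                 (fun i => decide (i ≤ j))) (fun x => x) with
        | some imax => PySem.Dict.insert r j (PySem.Dict.getD length_D imax 0)  -- imax is a key of length_D: lookup never raises, getD is exact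
        | none => PySem.Dict.insert r j 0)
      PySem.Dict.empty
  PySem.Dict.items result

-- ===== PORT B =====
def fl_dic_alt (D : List (Int × List Int)) (L : List Int) : List (Int × Int) :=
  let d := PySem.Dict.ofList D
  let keys := PySem.List.sorted (PySem.Dict.keys d) (fun x => x) false
  let pr := keys.foldl
      (fun (p : List Int × Int) k =>
        let t := p.2 + ((PySem.Dict.getD d k []).length : Int)  -- k ∈ d.keys: D[k] never raises, getD is exact
        (p.1 ++ [t], t))
      ([(0 : Int)], (0 : Int))
  let prefixSums := pr.1
  let result := L.foldl
      (fun (r : PySem.Dict Int Int) j =>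
        -- Source B's while-loop is verbatim bisect.bisect_right: ported as the prelude primitive
        PySem.Dict.insert r j (prefixSums.getD (PySem.List.bisectRight keys j) 0))  -- index ≤ len(keys) < len(prefix): in range, getD exact
      PySem.Dict.empty
  PySem.Dict.items result

-- ===== PRECONDITION & SPEC =====
def Spec_fl_dic (D : List (Int × List Int)) (L : List Int) (out : List (Int × Int)) : Prop := out = fl_dic_alt D L
instance (D : List (Int × List Int)) (L : List Int) (out : List (Int × Int)) : Decidable (Spec_fl_dic D L out) := by unfold Spec_fl_dic; infer_instance

-- ===== CLAIM (what is proved, stated in full; the proofs are below) =====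
def Claim_equal_fl_dic : Prop := ∀ (D : List (Int × List Int)) (L : List Int), Dom_fl_dic D L → Spec_fl_dic D L (fl_dic D L)

-- ===== LEMMAS AND PROOFS =====

-- running prefix sums: pvSums f t ks = [t+f k1, t+f k1+f k2, …]
def pvSums (f : Int → Int) : Int → List Int → List Int
  | _, [] => []
  | t, k :: ks => (t + f k) :: pvSums f (t + f k) ks

theorem pvFoldB_eq (f : Int → Int) (ks : List Int) (pre : List Int) (t : Int) :
    (ks.foldl (fun (p : List Int × Int) k => (p.1 ++ [p.2 + f k], p.2 + f k)) (pre, t)).1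
      = pre ++ pvSums f t ks := by
  induction ks generalizing pre t with
  | nil => simp [pvSums]
  | cons k ks ih => simp [pvSums, List.foldl_cons, ih, List.append_assoc]

theorem pvSums_getD (f : Int → Int) (ks : List Int) (t : Int) (i : Nat) (h : i < ks.length) :
    (pvSums f t ks).getD i 0 = t + ((ks.take (i + 1)).map f).sum := by
  induction ks generalizing t i with
  | nil => simp at h
  | cons k ks ih =>
    cases i with
    | zero => simp [pvSums]
    | succ i =>
      simp only [pvSums, List.getD_cons_succ, List.take_succ_cons, List.map_cons, List.sum_cons]
      rw [ih (t + f k) i (by simpa using h)]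
      ring

theorem pvFoldA_preserve (f : Int → Int) (ks : List Int) (d0 : PySem.Dict Int Int) (t : Int)
    (k : Int) (hk : k ∉ ks) :
    PySem.Dict.getD
      ((ks.foldl (fun (p : PySem.Dict Int Int × Int) key =>
          (p.1.insert key (p.2 + f key), p.2 + f key)) (d0, t)).1) k 0
      = PySem.Dict.getD d0 k 0 := by
  induction ks generalizing d0 t with
  | nil => rfl
  | cons k' ks ih =>
    simp only [List.foldl_cons]
    have hne : k ≠ k' := fun h => hk (by simp [h])
    have hks : k ∉ ks := fun h => hk (List.mem_cons_of_mem _ h)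
    rw [ih _ _ hks]
    exact PySem.Dict.getD_insert_of_ne _ _ _ hne

theorem pvFoldA_getD (f : Int → Int) (ks : List Int) (hnd : ks.Nodup)
    (d0 : PySem.Dict Int Int) (t : Int) (i : Nat) (h : i < ks.length) :
    PySem.Dict.getD
      ((ks.foldl (fun (p : PySem.Dict Int Int × Int) key =>
          (p.1.insert key (p.2 + f key), p.2 + f key)) (d0, t)).1) ks[i] 0
      = t + ((ks.take (i + 1)).map f).sum := by
  induction ks generalizing d0 t i with
  | nil => simp at h
  | cons k ks ih =>
    rw [List.nodup_cons] at hnd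
    obtain ⟨hk, hnd⟩ := hnd
    cases i with
    | zero =>
      simp only [List.foldl_cons, List.getElem_cons_zero, List.take_succ_cons, List.take_zero,
        List.map_cons, List.map_nil, List.sum_cons, List.sum_nil]
      rw [pvFoldA_preserve f ks _ _ k hk]
      rw [PySem.Dict.getD_insert_self]
      ring
    | succ i =>
      simp only [List.foldl_cons, List.getElem_cons_succ, List.take_succ_cons, List.map_cons,
        List.sum_cons]
      rw [ih hnd _ _ i (by simpa using h)]
      ring

theorem pvFilter_take (xs : List Int) (p : Int → Bool) (c : Nat) (hc : c ≤ xs.length)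
    (h1 : ∀ i (h : i < xs.length), i < c → p xs[i])
    (h2 : ∀ i (h : i < xs.length), c ≤ i → ¬ p xs[i]) :
    xs.filter p = xs.take c := by
  induction xs generalizing c with
  | nil => simp
  | cons x xs ih =>
    cases c with
    | zero =>
      simp only [List.take_zero]
      rw [List.filter_eq_nil_iff]
      intro a ha
      rcases List.mem_iff_getElem.mp ha with ⟨i, hi, rfl⟩
      exact fun hpa => h2 i hi (Nat.zero_le _) hpa
    | succ c =>
      have hx : p x := h1 0 (by simp) (Nat.succ_pos _)
      simp only [List.filter_cons, hx, if_true, List.take_succ_cons]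
      rw [ih c (by simpa using hc)
        (fun i hi hlt => h1 (i + 1) (by simpa using hi) (by omega))
        (fun i hi hge => h2 (i + 1) (by simpa using hi) (by omega))]

theorem pvMax_take (xs : List Int) (hle : xs.Pairwise (· ≤ ·)) (c : Nat) (hc0 : 0 < c)
    (hc : c ≤ xs.length) :
    PySem.List.max? (xs.take c) (fun x => x) = some (xs[c - 1]'(by omega)) := by
  have hne : xs.take c ≠ [] := by
    intro h
    have h2 : (xs.take c).length = 0 := by rw [h]; rfl
    rw [List.length_take] at h2
    omega
  rcases hm : PySem.List.max? (xs.take c) (fun x => x) with _ | m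
  · exact absurd ((PySem.List.max?_eq_none_iff _ _).mp hm) hne
  · have hmem : m ∈ xs.take c := PySem.List.max?_mem hm
    have hmax : ∀ y ∈ xs.take c, y ≤ m := by
      intro y hy
      exact PySem.List.max?_isMax hm y hy
    have hlast_mem : xs[c - 1]'(by omega) ∈ xs.take c := by
      rw [List.mem_iff_getElem]
      exact ⟨c - 1, by rw [List.length_take]; omega, by rw [List.getElem_take]⟩
    have h1 : xs[c - 1]'(by omega) ≤ m := hmax _ hlast_mem
    have h2 : m ≤ xs[c - 1]'(by omega) := by
      rcases List.mem_iff_getElem.mp hmem with ⟨i, hi, hEq⟩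
      have hi' : i < c := by rw [List.length_take] at hi; omega
      rw [List.getElem_take] at hEq
      subst hEq
      rcases Nat.lt_or_ge i (c - 1) with hlt | hge
      · exact (List.pairwise_iff_getElem.mp hle) i (c - 1) (by omega) (by omega) hlt
      · have : i = c - 1 := by omega
        subst this; exact le_refl _
    exact congrArg some (le_antisymm h2 h1)

-- the per-query value computed by A's body equals the one computed by B's body
theorem pvValue_eq (d : PySem.Dict Int (List Int)) (hnd : (PySem.Dict.keys d).Nodup) (j : Int) :
    (match PySem.List.max? ((PySem.List.sorted (PySem.Dict.keys d) (fun x => x) false).filter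
          (fun i => decide (i ≤ j))) (fun x => x) with
     | some imax =>
         PySem.Dict.getD
           (((PySem.List.sorted (PySem.Dict.keys d) (fun x => x) false).foldl
             (fun (p : PySem.Dict Int Int × Int) key =>
               (p.1.insert key (p.2 + ((PySem.Dict.getD d key []).length : Int)),
                p.2 + ((PySem.Dict.getD d key []).length : Int))) (PySem.Dict.empty, 0)).1) imax 0
     | none => (0 : Int))
    = ((PySem.List.sorted (PySem.Dict.keys d) (fun x => x) false).foldl
         (fun (p : List Int × Int) k =>
           (p.1 ++ [p.2 + ((PySem.Dict.getD d k []).length : Int)],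
            p.2 + ((PySem.Dict.getD d k []).length : Int))) ([(0 : Int)], (0 : Int))).1.getD
        (PySem.List.bisectRight (PySem.List.sorted (PySem.Dict.keys d) (fun x => x) false) j) 0 := by
  set f : Int → Int := fun k => ((PySem.Dict.getD d k []).length : Int) with hf
  set skeys := PySem.List.sorted (PySem.Dict.keys d) (fun x => x) false with hsk
  have hle : skeys.Pairwise (· ≤ ·) := PySem.List.sorted_pairwise ..
  have hnds : skeys.Nodup :=
    ((PySem.List.sorted_perm (PySem.Dict.keys d) (fun x => x) false).nodup_iff).mpr hnd
  obtain ⟨hcle, hltc, hgtc⟩ := PySem.List.bisectRight_spec skeys j hle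
  have hfilter : skeys.filter (fun i => decide (i ≤ j)) = skeys.take (PySem.List.bisectRight skeys j) := by
    refine pvFilter_take skeys _ _ hcle ?_ ?_
    · intro i hi hic; simpa using hltc i hi hic
    · intro i hi hic; simpa using not_le.mpr (hgtc i hi hic)
  rw [pvFoldB_eq f skeys [(0 : Int)] 0, hfilter]
  rcases hc : PySem.List.bisectRight skeys j with _ | i
  · simp only [List.take_zero]
    have : PySem.List.max? ([] : List Int) (fun x => x) = none :=
      (PySem.List.max?_eq_none_iff _ _).mpr rfl
    rw [this]
    simp
  · rw [pvMax_take skeys hle (i + 1) (Nat.succ_pos _) (hc ▸ hcle)]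
    simp only [Nat.add_sub_cancel]
    rw [pvFoldA_getD f skeys hnds PySem.Dict.empty 0 i (by have := hc ▸ hcle; omega)]
    rw [List.singleton_append, List.getD_cons_succ,
      pvSums_getD f skeys 0 i (by have := hc ▸ hcle; omega)]

theorem core_eq (D : List (Int × List Int)) (L : List Int) : fl_dic D L = fl_dic_alt D L := by
  have hnd := PySem.Dict.nodup_keys_ofList D
  simp only [fl_dic, fl_dic_alt]
  congr 1
  congr 1
  funext r j
  have hv := pvValue_eq (PySem.Dict.ofList D) hnd j
  rcases hmax : PySem.List.max? ((PySem.List.sorted (PySem.Dict.keys (PySem.Dict.ofList D))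
      (fun x => x) false).filter (fun i => decide (i ≤ j))) (fun x => x) with _ | im <;>
    rw [hmax] at hv <;> simp only [← hv]


-- ===== VERDICT (by name: the statement is the Claim_ definition above) =====
theorem fl_dic_spec : Claim_equal_fl_dic := by
  intro D L _
  unfold Spec_fl_dic
  exact core_eq D L
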